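-- pv_equiv track=rewrite | github.com/wgfajardom/portfolio | 08_the_latest_time_to_catch_a_bus/code_the_latest_time_to_catch_a_bus.py | assign_passengers_to_buses
-- ===== SOURCE A (Python) =====
-- def assign_passengers_to_buses(buses, passengers, capacity):
--
--     # Sort inputs
--     buses_s = sorted(buses)
--     passengers_s = sorted(passengers)
--
--     # Initialize list of lists passengers_by_bus
--     passengers_by_bus = []
--
--     # Fill passengers_by_bus
--     # The ith sublist represents the passengers that catch the ith bus
--     for ii in range(len(buses_s)):
--
--         # Arrival time of the ith bus
--         bus_time = buses_s[ii]
--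
--         # Passengers on queue when the ith bus arrives
--         aux = [pass_time for pass_time in passengers_s if pass_time <= bus_time]
--
--         # Passengers that catch the ith bus
--         if len(aux) == 0:
--             passengers_by_bus.append([])
--         else:
--             passengers_by_bus.append(aux[0:min(len(aux),capacity)])
--             passengers_s = passengers_s[min(len(aux),capacity):]
--
--     return sorted(passengers), passengers_by_bus
-- ===== SOURCE B (Python) =====
-- def assign_passengers_to_buses(buses, passengers, capacity):
--     p = sorted(passengers)
--     buses_s = sorted(buses)
--     cap = max(capacity, 0)
--     n = len(p)
--     buckets = []
--     i = j = 0
--     for bi in range(len(buses_s)):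
--         if i == n:
--             # no passengers left: every remaining bus departs empty
--             buckets += [[]] * (len(buses_s) - bi)
--             break
--         t = buses_s[bi]
--         while j < n and p[j] <= t:
--             j += 1
--         k = min(j - i, cap)
--         buckets.append(p[i:i+k])
--         i += k
--     return p, buckets
-- ===== Notes on version B (the rewrite author's own statement) =====
-- stated objective: faster
-- what changed: Replaces A's per-bus full scan and re-slicing of the remaining passenger list (a fresh filter over all remaining passengers for every bus) by a single two-pointer sweep over the sorted passengers, each pointer moving only forward.
-- outside the precondition, e.g. on assign_passengers_to_buses([5], [1, 2, 3], -1): A returns ([1, 2, 3], [[1, 2]]), B returns ([1, 2, 3], [[]])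
import Mathlib
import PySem

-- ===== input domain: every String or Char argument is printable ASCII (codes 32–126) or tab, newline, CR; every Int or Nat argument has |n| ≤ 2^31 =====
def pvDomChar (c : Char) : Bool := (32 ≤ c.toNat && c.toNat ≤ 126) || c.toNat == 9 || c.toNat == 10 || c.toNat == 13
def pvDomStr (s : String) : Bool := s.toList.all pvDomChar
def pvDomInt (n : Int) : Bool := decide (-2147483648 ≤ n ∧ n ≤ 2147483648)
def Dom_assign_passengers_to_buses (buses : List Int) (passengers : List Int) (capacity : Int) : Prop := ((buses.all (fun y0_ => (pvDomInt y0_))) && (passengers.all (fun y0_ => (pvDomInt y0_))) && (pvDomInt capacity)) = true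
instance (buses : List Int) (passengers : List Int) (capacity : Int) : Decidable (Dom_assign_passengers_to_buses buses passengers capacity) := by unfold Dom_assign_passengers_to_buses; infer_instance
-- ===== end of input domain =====

-- B replaces A's per-bus rescan of the remaining passengers by one forward two-pointer sweep
-- over the sorted passenger list (a timing run measured B faster on the large inputs).

-- ===== PORT A =====
-- loop body of A's 'for ii in range(len(buses_s))' loop; state = (passengers_s, passengers_by_bus)
def pvStepA (capacity : Int) (st : List Int × List (List Int)) (bus_time : Int) :
    List Int × List (List Int) :=
  let aux := st.1.filter (fun q => decide (q ≤ bus_time))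
  if aux.length = 0 then
    (st.1, st.2 ++ [[]])
  else
    (PySem.List.slice st.1 (some (min (aux.length : Int) capacity)) none,
     st.2 ++ [PySem.List.slice aux (some 0) (some (min (aux.length : Int) capacity))])

def assign_passengers_to_buses (buses : List Int) (passengers : List Int) (capacity : Int) :
    List Int × List (List Int) :=
  let buses_s := PySem.List.sorted buses (fun x => x) false
  let passengers_s := PySem.List.sorted passengers (fun x => x) false
  let st := buses_s.foldl (pvStepA capacity) (passengers_s, [])
  (PySem.List.sorted passengers (fun x => x) false, st.2)

-- ===== PORT B =====
-- 'while j < len(p) and p[j] <= t: j += 1'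
def pvAdvance (p : List Int) (t : Int) (j : Nat) : Nat :=
  if h : j < p.length then
    if p[j] ≤ t then pvAdvance p t (j + 1) else j
  else j
termination_by p.length - j

-- 'for bi in range(len(buses_s))' with pointers i (next unassigned passenger) and j (scan
-- pointer); once the passengers are exhausted the remaining buses all get '[]' at once
def pvLoopB (p : List Int) (cap : Nat) : List Int → Nat → Nat → List (List Int) → List (List Int)
  | [], _, _, acc => acc
  | t :: ts, i, j, acc =>
    if i = p.length then acc ++ List.replicate (ts.length + 1) []
    else
      let j' := pvAdvance p t j
      let k := min (j' - i) cap
      pvLoopB p cap ts (i + k) j' (acc ++ [(p.drop i).take k])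

def assign_passengers_to_buses_alt (buses : List Int) (passengers : List Int) (capacity : Int) :
    List Int × List (List Int) :=
  let p := PySem.List.sorted passengers (fun x => x) false
  let cap := (max capacity 0).toNat
  (p, pvLoopB p cap (PySem.List.sorted buses (fun x => x) false) 0 0 [])

-- ===== PRECONDITION & SPEC =====
-- Pre_ excludes negative capacity (outside the task's natural domain): there A's
-- 'aux[0:min(len(aux),capacity)]' / 'passengers_s[capacity:]' negative slices silently drop
-- passengers from the wrong end, an accident of A's implementation.
def Pre_assign_passengers_to_buses (buses : List Int) (passengers : List Int) (capacity : Int) : Prop :=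
  0 ≤ capacity
instance (buses : List Int) (passengers : List Int) (capacity : Int) : Decidable (Pre_assign_passengers_to_buses buses passengers capacity) := by unfold Pre_assign_passengers_to_buses; infer_instance

def pvWitness_assign_passengers_to_buses : List Int × List Int × Int := ([1, 3], [0, 2, 5], 1)

def Spec_assign_passengers_to_buses (buses : List Int) (passengers : List Int) (capacity : Int) (out : List Int × List (List Int)) : Prop := out = assign_passengers_to_buses_alt buses passengers capacity
instance (buses : List Int) (passengers : List Int) (capacity : Int) (out : List Int × List (List Int)) : Decidable (Spec_assign_passengers_to_buses buses passengers capacity out) := by unfold Spec_assign_passengers_to_buses; infer_instance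

-- ===== CLAIM (what is proved, stated in full; the proofs are below) =====
def Claim_equal_assign_passengers_to_buses : Prop := ∀ (buses : List Int) (passengers : List Int) (capacity : Int), Dom_assign_passengers_to_buses buses passengers capacity → Pre_assign_passengers_to_buses buses passengers capacity → Spec_assign_passengers_to_buses buses passengers capacity (assign_passengers_to_buses buses passengers capacity)

-- ===== LEMMAS AND PROOFS =====

-- on a sorted list, filtering by '≤ t' is taking the initial segment
lemma pv_filter_eq_takeWhile (t : Int) :
    ∀ l : List Int, l.Pairwise (· ≤ ·) →
      l.filter (fun q => decide (q ≤ t)) = l.takeWhile (fun q => decide (q ≤ t)) := by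
  intro l hl
  induction l with
  | nil => rfl
  | cons x xs ih =>
    rcases List.pairwise_cons.mp hl with ⟨hx, hxs⟩
    by_cases hxt : x ≤ t
    · simp [List.filter, List.takeWhile, hxt, ih hxs]
    · have : xs.filter (fun q => decide (q ≤ t)) = [] := by
        rw [List.filter_eq_nil_iff]
        intro a ha
        simp only [decide_eq_true_eq]
        intro hat
        exact hxt (le_trans (hx a ha) hat)
      simp [List.filter, List.takeWhile, hxt, this]

-- pvAdvance walks exactly the takeWhile-prefix of drop j
lemma pv_advance_eq (p : List Int) (t : Int) :
    ∀ j : Nat, j ≤ p.length →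
      pvAdvance p t j = j + ((p.drop j).takeWhile (fun q => decide (q ≤ t))).length := by
  intro j
  induction hn : p.length - j generalizing j with
  | zero =>
    intro hj
    have hj' : j = p.length := by omega
    rw [pvAdvance]
    simp [hj']
  | succ n ih =>
    intro hj
    have hjl : j < p.length := by omega
    have hdrop : p.drop j = p[j] :: p.drop (j + 1) :=
      List.drop_eq_getElem_cons hjl
    rw [pvAdvance]
    by_cases hle : p[j] ≤ t
    · have := ih (j + 1) (by omega) (by omega)
      rw [dif_pos hjl, if_pos hle, this, hdrop]
      simp [List.takeWhile, hle]
      omega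
    · rw [dif_pos hjl, if_neg hle, hdrop]
      simp [List.takeWhile, hle]

lemma pv_advance_ge (p : List Int) (t : Int) (j : Nat) (hj : j ≤ p.length) :
    j ≤ pvAdvance p t j := by
  rw [pv_advance_eq p t j hj]; omega

lemma pv_advance_le (p : List Int) (t : Int) (j : Nat) (hj : j ≤ p.length) :
    pvAdvance p t j ≤ p.length := by
  rw [pv_advance_eq p t j hj]
  have h1 : ((p.drop j).takeWhile (fun q => decide (q ≤ t))).length ≤ (p.drop j).length :=
    (List.takeWhile_prefix _).length_le
  simp at h1
  omega

-- if the first n elements of l satisfy q, takeWhile splits around them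
lemma pv_takeWhile_split (q : Int → Bool) :
    ∀ (n : Nat) (l : List Int), n ≤ l.length → (∀ m, (h : m < n) → (hm : m < l.length) → q l[m]) →
      l.takeWhile q = l.take n ++ (l.drop n).takeWhile q := by
  intro n
  induction n with
  | zero => intro l _ _; simp
  | succ n ih =>
    intro l hn hq
    cases l with
    | nil => simp at hn
    | cons x xs =>
      have hx : q x := hq 0 (by omega) (by simp)
      have := ih xs (by simpa using hn)
        (fun m h hm => hq (m + 1) (by omega) (by simpa using Nat.succ_lt_succ hm))
      simp [List.takeWhile, hx, this]

-- elements inside the takeWhile-prefix satisfy the predicate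
lemma pv_getElem_lt_takeWhile (q : Int → Bool) (l : List Int) (m : Nat)
    (hm : m < (l.takeWhile q).length) (hml : m < l.length) : q l[m] := by
  have hpre : l.takeWhile q <+: l := List.takeWhile_prefix q
  have hget : (l.takeWhile q)[m] = l[m] := hpre.getElem hm
  have := List.mem_takeWhile_imp (l := l) (p := q) (x := (l.takeWhile q)[m])
    (List.getElem_mem hm)
  rwa [hget] at this

-- once the remaining-passenger list is empty, A's fold appends '[]' once per bus
lemma pv_foldA_nil (cap : Int) :
    ∀ (bs : List Int) (acc : List (List Int)),
      (bs.foldl (pvStepA cap) (([] : List Int), acc)).2 = acc ++ List.replicate bs.length [] := by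
  intro bs
  induction bs with
  | nil => intro acc; simp
  | cons t ts ih =>
    intro acc
    have hstep : pvStepA cap (([] : List Int), acc) t = (([] : List Int), acc ++ [[]]) := by
      unfold pvStepA
      simp
    rw [List.foldl_cons, hstep, ih]
    simp [List.replicate_succ]

-- MAIN: A's fold over the remaining-passenger suffix equals B's two-pointer loop
lemma pv_main (p : List Int) (hp : p.Pairwise (· ≤ ·)) (cap : Int) (hcap : 0 ≤ cap) :
    ∀ (bs : List Int) (i j : Nat) (acc : List (List Int)),
      i ≤ j → j ≤ p.length →
      (∀ t ∈ bs, ∀ idx : Nat, i ≤ idx → idx < j → (h : idx < p.length) → p[idx] ≤ t) →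
      bs.Pairwise (· ≤ ·) →
      (bs.foldl (pvStepA cap) (p.drop i, acc)).2 = pvLoopB p cap.toNat bs i j acc := by
  intro bs
  induction bs with
  | nil => intro i j acc _ _ _ _; rfl
  | cons t ts ih =>
    intro i j acc hij hjl hinv hbs
    rcases List.pairwise_cons.mp hbs with ⟨hts, hts'⟩
    by_cases hin : i = p.length
    · have hnil : p.drop i = [] := by rw [hin]; simp
      rw [pvLoopB, if_pos hin, hnil, pv_foldA_nil]
      simp
    · have hdp : (p.drop i).Pairwise (· ≤ ·) := hp.drop
      have haux : (p.drop i).filter (fun q => decide (q ≤ t)) =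
          (p.drop i).takeWhile (fun q => decide (q ≤ t)) := pv_filter_eq_takeWhile t _ hdp
      have hsplit : (p.drop i).takeWhile (fun q => decide (q ≤ t)) =
          (p.drop i).take (j - i) ++ ((p.drop i).drop (j - i)).takeWhile (fun q => decide (q ≤ t)) := by
        apply pv_takeWhile_split _ (j - i) _ (by simp; omega)
        intro m h hm
        rw [List.getElem_drop]
        simpa using hinv t (List.mem_cons_self) (i + m) (by omega) (by omega) (by omega)
      have hdd : (p.drop i).drop (j - i) = p.drop j := by
        rw [List.drop_drop]; congr 1; omega
      have hj' : pvAdvance p t j = j + ((p.drop j).takeWhile (fun q => decide (q ≤ t))).length :=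
        pv_advance_eq p t j hjl
      set j' := pvAdvance p t j with hj'def
      have hLaux : ((p.drop i).takeWhile (fun q => decide (q ≤ t))).length = j' - i := by
        rw [hsplit, hdd, List.length_append, List.length_take, hj']
        simp; omega
      have hj'ge : j ≤ j' := pv_advance_ge p t j hjl
      have hj'le : j' ≤ p.length := pv_advance_le p t j hjl
      -- takeWhile prefix elements are ≤ t
      have htw : ∀ idx : Nat, i ≤ idx → idx < j' → (h : idx < p.length) → p[idx] ≤ t := by
        intro idx hi hlt h
        have hm : idx - i < ((p.drop i).takeWhile (fun q => decide (q ≤ t))).length := by omega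
        have hml : idx - i < (p.drop i).length := by simp; omega
        have := pv_getElem_lt_takeWhile _ (p.drop i) (idx - i) hm hml
        rw [List.getElem_drop] at this
        have heq : i + (idx - i) = idx := by omega
        simp only [heq] at this
        simpa using this
      -- the step of A
      set L := j' - i with hLdef
      set k := min L cap.toNat with hkdef
      have hkL : k ≤ L := Nat.min_le_left _ _
      have hstep : pvStepA cap (p.drop i, acc) t = (p.drop (i + k), acc ++ [(p.drop i).take k]) := by
        unfold pvStepA
        simp only [haux, hLaux]
        by_cases hL0 : L = 0
        · have htwnil : (p.drop i).takeWhile (fun q => decide (q ≤ t)) = [] :=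
            List.eq_nil_of_length_eq_zero (by rw [hLaux]; exact hL0)
          have hk0 : k = 0 := by omega
          rw [if_pos hL0]
          simp [hk0]
        · rw [if_neg hL0]
          have hmin : min ((L : Int)) cap = (k : Int) := by
            rw [hkdef]
            omega
          rw [hmin, Prod.mk.injEq]
          refine ⟨?_, ?_⟩
          · rw [PySem.List.slice_from _ (by positivity)]
            rw [Int.toNat_natCast, List.drop_drop, Nat.add_comm]
          · have hk' : List.take k ((p.drop i).takeWhile (fun q => decide (q ≤ t))) =
                List.take k (p.drop i) := by
              rcases List.takeWhile_prefix (l := p.drop i) (p := fun q => decide (q ≤ t)) with ⟨s, hs⟩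
              conv_rhs => rw [← hs]
              rw [List.take_append_of_le_length (by rw [hLaux]; exact hkL)]
            congr 1
            rw [PySem.List.slice_zero_start, PySem.List.slice_to _ (by positivity),
              Int.toNat_natCast, hk']
      -- assemble
      rw [List.foldl_cons, hstep, pvLoopB, if_neg hin]
      have hik : i + k ≤ j' := by omega
      have hinv' : ∀ t'' ∈ ts, ∀ idx : Nat, i + k ≤ idx → idx < j' → (h : idx < p.length) → p[idx] ≤ t'' := by
        intro t'' ht'' idx hi hlt h
        exact le_trans (htw idx (by omega) hlt h) (hts t'' ht'')
      exact ih (i + k) j' (acc ++ [(p.drop i).take k]) hik hj'le hinv' hts'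

-- ===== VERDICT (by name: the statement is the Claim_ definition above) =====
theorem assign_passengers_to_buses_spec : Claim_equal_assign_passengers_to_buses := by
  intro buses passengers capacity _ hpre
  unfold Spec_assign_passengers_to_buses assign_passengers_to_buses assign_passengers_to_buses_alt
  simp only
  congr 1
  have hp : (PySem.List.sorted passengers (fun x => x) false).Pairwise (· ≤ ·) := by
    simpa using PySem.List.sorted_pairwise (xs := passengers) (key := fun x => x)
  have hb : (PySem.List.sorted buses (fun x => x) false).Pairwise (· ≤ ·) := by
    simpa using PySem.List.sorted_pairwise (xs := buses) (key := fun x => x)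
  have hcapeq : (max capacity 0).toNat = capacity.toNat := by omega
  rw [hcapeq]
  have := pv_main (PySem.List.sorted passengers (fun x => x) false) hp capacity hpre
    (PySem.List.sorted buses (fun x => x) false) 0 0 [] (le_refl 0) (by omega)
    (by intro t _ idx _ h _; omega) hb
  simpa using this
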